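-- pv_equiv track=rewrite | github.com/Allegris/Speciale | OLD delete later/wavelet_tree_level_order.py | node_word_ranks
-- ===== SOURCE A (Python) =====
-- from math import log2, floor, ceil
--
-- def node_word_ranks(bitvector):
-- 	n = len(bitvector)
-- 	ranks = {0: [], 1: []}
-- 	if n == 0: return ranks
-- 	word_size = max(floor(log2(n)), 1)
-- 	#word_size = floor(log2(n)) if floor(log2(n)) < 0 else 1  # BLOWS SPACE USAGE UP???
-- 	for i in range(n // word_size): # Iterate words
-- 		word = bitvector[i*word_size: (i+1)*word_size]
-- 		prev_0s = 0 if i == 0 else ranks[0][i-1]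
-- 		prev_1s = 0 if i == 0 else ranks[1][i-1]
-- 		ranks[0].append(prev_0s + word.count(0))
-- 		ranks[1].append(prev_1s + word.count(1))
-- 	return ranks
-- ===== SOURCE B (Python) =====
-- from math import log2, floor
--
--
-- def node_word_ranks(bitvector):
--     # One pass builds global prefix counts of 0s and 1s; the per-word
--     # cumulative ranks are then just those prefix counts sampled at the
--     # word boundaries -- no per-word slicing or read-previous arithmetic.
--     n = len(bitvector)
--     if n == 0:
--         return {0: [], 1: []}
--     w = max(floor(log2(n)), 1)
--     c0 = c1 = 0
--     p0 = []
--     p1 = []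
--     for b in bitvector:
--         if b == 0:
--             c0 += 1
--         if b == 1:
--             c1 += 1
--         p0.append(c0)
--         p1.append(c1)
--     m = n // w
--     return {0: [p0[(i + 1) * w - 1] for i in range(m)],
--             1: [p1[(i + 1) * w - 1] for i in range(m)]}
-- ===== Notes on version B (the rewrite author's own statement) =====
-- stated objective: alternative
-- what changed: B replaces A's per-word slicing-and-count loop (which copies each word and reads the previous cumulative entry back out of the ranks list) by one pass building global prefix counts of 0s and 1s over the whole bitvector, then samples those prefix arrays at the word boundaries; same asymptotic cost, different decomposition.
import Mathlib
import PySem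

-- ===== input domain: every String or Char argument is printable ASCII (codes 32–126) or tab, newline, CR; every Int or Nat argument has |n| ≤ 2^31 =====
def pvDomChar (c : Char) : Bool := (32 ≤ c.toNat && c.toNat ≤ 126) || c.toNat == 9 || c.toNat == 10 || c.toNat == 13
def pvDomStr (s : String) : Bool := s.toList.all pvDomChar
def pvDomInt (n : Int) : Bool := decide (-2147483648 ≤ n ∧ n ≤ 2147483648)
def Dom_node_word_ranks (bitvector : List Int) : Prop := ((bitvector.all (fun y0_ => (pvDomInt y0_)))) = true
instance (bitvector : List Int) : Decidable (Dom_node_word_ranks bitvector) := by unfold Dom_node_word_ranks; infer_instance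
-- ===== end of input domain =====

-- B builds global prefix counts of 0s/1s in one pass and samples them at the word
-- boundaries, instead of A's per-word slice-count-and-read-previous loop.
-- floor(log2(n)) is ported as bitLength(n) - 1, exact for every realizable list length.

-- ===== PORT A =====
def node_word_ranks (bitvector : List Int) : List (Int × List Int) :=
  let n := bitvector.length
  if n = 0 then [(0, []), (1, [])]
  else
    let word_size : Nat := max (PySem.Int.bitLength (n : Int) - 1) 1
    let r := (PySem.List.pyRange 0 (↑(n / word_size)) 1).foldl
      (fun (r : List Int × List Int) i =>
        let word := PySem.List.slice bitvector (some (i * ↑word_size)) (some ((i + 1) * ↑word_size))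
        -- ranks[0][i-1] / ranks[1][i-1]: index i-1 is in range whenever read (i ≥ 1), so getD is exact
        let prev0 : Int := if i == 0 then 0 else PySem.List.pyGetD r.1 (i - 1) 0
        let prev1 : Int := if i == 0 then 0 else PySem.List.pyGetD r.2 (i - 1) 0
        (r.1 ++ [prev0 + (word.count 0 : Int)], r.2 ++ [prev1 + (word.count 1 : Int)]))
      ([], [])
    [(0, r.1), (1, r.2)]

-- ===== PORT B =====
def node_word_ranks_alt (bitvector : List Int) : List (Int × List Int) :=
  let n := bitvector.length
  if n = 0 then [(0, []), (1, [])]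
  else
    let w : Nat := max (PySem.Int.bitLength (n : Int) - 1) 1
    let s := bitvector.foldl
      (fun (s : Int × Int × List Int × List Int) b =>
        let c0 := if b == 0 then s.1 + 1 else s.1
        let c1 := if b == 1 then s.2.1 + 1 else s.2.1
        (c0, c1, s.2.2.1 ++ [c0], s.2.2.2 ++ [c1]))
      (0, 0, [], [])
    let m := n / w
    -- p0[(i+1)*w - 1] / p1[(i+1)*w - 1]: index is in range for every i < m, so getD is exact
    [(0, (PySem.List.pyRange 0 (↑m) 1).map (fun i => PySem.List.pyGetD s.2.2.1 ((i + 1) * ↑w - 1) 0)),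
     (1, (PySem.List.pyRange 0 (↑m) 1).map (fun i => PySem.List.pyGetD s.2.2.2 ((i + 1) * ↑w - 1) 0))]

-- ===== PRECONDITION & SPEC =====
def Spec_node_word_ranks (bitvector : List Int) (out : List (Int × List Int)) : Prop := out = node_word_ranks_alt bitvector
instance (bitvector : List Int) (out : List (Int × List Int)) : Decidable (Spec_node_word_ranks bitvector out) := by unfold Spec_node_word_ranks; infer_instance

-- ===== CLAIM (what is proved, stated in full; the proofs are below) =====
def Claim_equal_node_word_ranks : Prop := ∀ (bitvector : List Int), Dom_node_word_ranks bitvector → Spec_node_word_ranks bitvector (node_word_ranks bitvector)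

-- ===== LEMMAS AND PROOFS =====

-- count of v among the first k elements, as an Int: the common reference both ports reach
def pvCnt (bv : List Int) (v : Int) (k : Nat) : Int := ((bv.take k).count v : Int)

lemma pvCnt_cons (x : Int) (xs : List Int) (v : Int) (k : Nat) :
    pvCnt (x :: xs) v (k + 1) = (if x == v then (1:Int) else 0) + pvCnt xs v k := by
  by_cases h : x = v
  · simp [pvCnt, h]; ring
  · simp [pvCnt, h]

lemma pvCnt_succ (bv : List Int) (v : Int) (a b : Nat) :
    pvCnt bv v (a + b) = pvCnt bv v a + (((bv.drop a).take b).count v : Int) := by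
  simp [pvCnt, List.take_add, List.count_append]

-- B's single pass computes the running counters and the two prefix-count tables
lemma pvBfold (bv : List Int) (a0 a1 : Int) (q0 q1 : List Int) :
    bv.foldl
      (fun (s : Int × Int × List Int × List Int) b =>
        let c0 := if b == 0 then s.1 + 1 else s.1
        let c1 := if b == 1 then s.2.1 + 1 else s.2.1
        (c0, c1, s.2.2.1 ++ [c0], s.2.2.2 ++ [c1]))
      (a0, a1, q0, q1)
    = (a0 + pvCnt bv 0 bv.length, a1 + pvCnt bv 1 bv.length,
       q0 ++ (List.range bv.length).map (fun j => a0 + pvCnt bv 0 (j + 1)),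
       q1 ++ (List.range bv.length).map (fun j => a1 + pvCnt bv 1 (j + 1))) := by
  induction bv generalizing a0 a1 q0 q1 with
  | nil => simp [pvCnt]
  | cons x xs ih =>
    simp only [List.foldl_cons]
    rw [ih]
    simp only [List.length_cons, List.range_succ_eq_map, List.map_cons, List.map_map,
      Function.comp_def, pvCnt_cons]
    by_cases h0 : x = 0 <;> by_cases h1 : x = 1 <;>
      simp [h0, h1, add_comm, add_assoc, add_left_comm, pvCnt]

-- A's per-word cumulative loop yields pvCnt sampled at the word boundaries
lemma pvAfold (bv : List Int) (w : Nat) (hw : 1 ≤ w) (m : Nat) :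
    (PySem.List.pyRange 0 (↑m) 1).foldl
      (fun (r : List Int × List Int) i =>
        let word := PySem.List.slice bv (some (i * ↑w)) (some ((i + 1) * ↑w))
        let prev0 : Int := if i == 0 then 0 else PySem.List.pyGetD r.1 (i - 1) 0
        let prev1 : Int := if i == 0 then 0 else PySem.List.pyGetD r.2 (i - 1) 0
        (r.1 ++ [prev0 + (word.count 0 : Int)], r.2 ++ [prev1 + (word.count 1 : Int)]))
      ([], [])
    = ((List.range m).map (fun i => pvCnt bv 0 ((i + 1) * w)),
       (List.range m).map (fun i => pvCnt bv 1 ((i + 1) * w))) := by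
  induction m with
  | zero => simp [PySem.List.pyRange_one_eq_nil]
  | succ m ih =>
    have hsplit : PySem.List.pyRange 0 (↑(m + 1)) 1
        = PySem.List.pyRange 0 (↑m) 1 ++ [(↑m : Int)] := by
      have := PySem.List.pyRange_one_succ_right (a := 0) (b := (↑m : Int)) (Int.natCast_nonneg m)
      push_cast
      exact this
    rw [hsplit, List.foldl_append, ih]
    simp only [List.foldl_cons, List.foldl_nil]
    have hslice : PySem.List.slice bv (some ((↑m : Int) * ↑w)) (some (((↑m : Int) + 1) * ↑w))
        = (bv.drop (m * w)).take w := by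
      have h1 : ((↑m : Int) * ↑w) = ((m * w : Nat) : Int) := by push_cast; ring
      have h2 : (((↑m : Int) + 1) * ↑w) = ((m * w + w : Nat) : Int) := by push_cast; ring
      rw [h1, h2, PySem.List.slice_natCast]
      congr 1
      omega
    have hword : ∀ v : Int, pvCnt bv v (m * w) + ((((bv.drop (m*w)).take w).count v : Nat) : Int)
        = pvCnt bv v ((m + 1) * w) := by
      intro v
      rw [show (m + 1) * w = m * w + w by ring, pvCnt_succ]
    have hprev : ∀ v : Int, (if ((↑m : Int) == 0) then (0:Int)
          else PySem.List.pyGetD ((List.range m).map (fun i => pvCnt bv v ((i + 1) * w))) ((↑m : Int) - 1) 0)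
        = pvCnt bv v (m * w) := by
      intro v
      rcases Nat.eq_zero_or_pos m with hm | hm
      · subst hm; simp [pvCnt]
      · have hne : ((↑m : Int) == 0) = false := by simp; omega
        rw [hne]
        simp only [Bool.false_eq_true, if_false]
        have hidx : ((↑m : Int) - 1) = ((m - 1 : Nat) : Int) := by omega
        rw [hidx, PySem.List.pyGetD_natCast]
        have hlt : m - 1 < m := by omega
        rw [List.getD_eq_getElem _ _ (by simpa using hlt)]
        simp only [List.getElem_map, List.getElem_range]
        rw [Nat.sub_add_cancel hm]
    rw [hslice]
    simp only [hprev, hword, List.range_succ, List.map_append, List.map_cons, List.map_nil]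

-- B's sampled prefix table equals A's per-word cumulative column, for each value v
lemma pvSample (bv : List Int) (v : Int) (w : Nat) (hw : 1 ≤ w) :
    (PySem.List.pyRange 0 (↑(bv.length / w)) 1).map
      (fun i => PySem.List.pyGetD ((List.range bv.length).map (fun j => pvCnt bv v (j + 1))) ((i + 1) * ↑w - 1) 0)
    = (List.range (bv.length / w)).map (fun i => pvCnt bv v ((i + 1) * w)) := by
  rw [PySem.List.pyRange_one]
  simp only [sub_zero, Int.toNat_natCast, List.map_map, Function.comp_def, zero_add]
  apply List.map_congr_left
  intro k hk
  have hk' : k < bv.length / w := List.mem_range.mp hk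
  have hle : (k + 1) * w ≤ bv.length := by
    calc (k + 1) * w ≤ (bv.length / w) * w := Nat.mul_le_mul_right _ (by omega)
    _ ≤ bv.length := Nat.div_mul_le_self _ _
  have h1 : 1 ≤ (k + 1) * w := by
    calc 1 ≤ 1 * w := by omega
    _ ≤ (k + 1) * w := Nat.mul_le_mul_right _ (by omega)
  have hidx : ((k : Int) + 1) * ↑w - 1 = (((k + 1) * w - 1 : Nat) : Int) := by
    push_cast [h1]
    ring
  rw [hidx, PySem.List.pyGetD_natCast,
    List.getD_eq_getElem _ _ (by simp; omega)]
  simp only [List.getElem_map, List.getElem_range]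
  congr 1
  omega

-- ===== VERDICT (by name: the statement is the Claim_ definition above) =====
theorem node_word_ranks_spec : Claim_equal_node_word_ranks := by
  intro bv _
  unfold Spec_node_word_ranks
  by_cases hn : bv.length = 0
  · simp [node_word_ranks, node_word_ranks_alt, hn]
  · unfold node_word_ranks node_word_ranks_alt
    simp only [hn, if_false]
    set w : Nat := max (PySem.Int.bitLength (bv.length : Int) - 1) 1 with hwdef
    have hw : 1 ≤ w := le_max_right _ _
    rw [pvAfold bv w hw, pvBfold]
    simp only [List.nil_append, zero_add]
    rw [pvSample bv 0 w hw, pvSample bv 1 w hw]
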